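-- pv_equiv track=rewrite | github.com/Bzdeco/rtdetr | rtdetr_pytorch/powerlines/data/config.py | sample_index_to_frame_id
-- ===== SOURCE A (Python) =====
-- from typing import Optional, Dict, List, Any, Set
--
-- def sample_index_to_frame_id(num_cable_samples_per_frame: List[int], num_bg_samples_per_frame: int) -> Dict[int, int]:
--     num_frames = len(num_cable_samples_per_frame)
--     if num_frames == 0:
--         return {}
--
--     num_total_cable_samples = sum(num_cable_samples_per_frame)
--     num_total_samples = num_total_cable_samples + num_frames * num_bg_samples_per_frame
--
--     index_to_frame_id = {}
--     current_frame_id = 0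
--     num_added_samples_to_current_frame = 0
--     num_available_samples_in_curr_frame = num_cable_samples_per_frame[current_frame_id] + num_bg_samples_per_frame
--
--     for idx in range(num_total_samples):
--         while num_available_samples_in_curr_frame == 0:
--             # Advance to next frame
--             current_frame_id += 1
--             num_added_samples_to_current_frame = 0
--             num_available_samples_in_curr_frame = num_cable_samples_per_frame[current_frame_id] + num_bg_samples_per_frame
--
--         if num_added_samples_to_current_frame >= num_available_samples_in_curr_frame:
--             current_frame_id += 1
--             num_added_samples_to_current_frame = 0
--             num_available_samples_in_curr_frame = num_cable_samples_per_frame[current_frame_id] + num_bg_samples_per_frame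
--
--             while num_available_samples_in_curr_frame == 0:
--                 # Advance to next frame
--                 current_frame_id += 1
--                 num_added_samples_to_current_frame = 0
--                 num_available_samples_in_curr_frame = num_cable_samples_per_frame[current_frame_id] + num_bg_samples_per_frame
--
--         index_to_frame_id[idx] = current_frame_id
--         num_added_samples_to_current_frame += 1
--
--     return index_to_frame_id
-- ===== SOURCE B (Python) =====
-- from typing import Dict, List
--
--
-- def sample_index_to_frame_id(num_cable_samples_per_frame: List[int], num_bg_samples_per_frame: int) -> Dict[int, int]:
--     index_to_frame_id = {}
--     next_index = 0
--     for frame_id, num_cable in enumerate(num_cable_samples_per_frame):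
--         for _ in range(num_cable + num_bg_samples_per_frame):
--             index_to_frame_id[next_index] = frame_id
--             next_index += 1
--     return index_to_frame_id
-- ===== Notes on version B (the rewrite author's own statement) =====
-- stated objective: simpler
-- what changed: Replaces the single flat loop over all sample indices with its frame-advancing state machine (current frame id, added/available counters, two while-loops) by a direct nested iteration: for each frame, assign the next block of consecutive indices via a running counter.
-- outside the precondition, e.g. on sample_index_to_frame_id([3, -1], 0): A returns {0: 0, 1: 0}, B returns {0: 0, 1: 0, 2: 0}
import Mathlib
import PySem

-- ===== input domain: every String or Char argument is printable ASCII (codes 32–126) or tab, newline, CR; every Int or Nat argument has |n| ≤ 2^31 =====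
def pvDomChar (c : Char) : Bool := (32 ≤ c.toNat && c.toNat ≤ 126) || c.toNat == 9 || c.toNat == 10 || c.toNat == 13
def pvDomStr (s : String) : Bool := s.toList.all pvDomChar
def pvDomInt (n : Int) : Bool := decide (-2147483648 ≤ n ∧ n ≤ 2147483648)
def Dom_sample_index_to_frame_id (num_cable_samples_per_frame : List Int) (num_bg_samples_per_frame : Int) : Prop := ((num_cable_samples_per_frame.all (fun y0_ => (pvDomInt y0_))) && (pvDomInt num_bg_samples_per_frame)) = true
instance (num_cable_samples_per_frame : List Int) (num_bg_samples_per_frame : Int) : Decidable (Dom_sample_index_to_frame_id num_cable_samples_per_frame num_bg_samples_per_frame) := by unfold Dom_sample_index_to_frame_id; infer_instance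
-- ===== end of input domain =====

-- B replaces A's flat index loop with the frame-advancing state machine by a direct
-- nested loop over frames (objective: simpler); equal on the natural domain of
-- nonnegative per-frame sample blocks (Pre_).

-- ===== PORT A =====
-- The Python 'while num_available_samples_in_curr_frame == 0: …advance…' loop
-- (it also appears after the if-branch advance).  Fuel-bounded (the guard only
-- makes the recursion total); 'none' = the IndexError of counts[current_frame_id].
def pvWhileAdv (counts : List Int) (bg : Int) (fid added avail : Int) (fuel : Nat) : Option (Int × Int × Int) :=
  match fuel with
  | 0 => none
  | fuel + 1 =>
    if avail = 0 then
      match PySem.List.pyGet? counts (fid + 1) with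
      | none => none
      | some c => pvWhileAdv counts bg (fid + 1) 0 (c + bg) fuel
    else some (fid, added, avail)

-- one iteration of 'for idx in range(num_total_samples)'; state (dict, fid, added, avail)
def pvStepA (counts : List Int) (bg : Int) (st : Option (PySem.Dict Int Int × Int × Int × Int)) (idx : Int) : Option (PySem.Dict Int Int × Int × Int × Int) :=
  match st with
  | none => none
  | some (d, fid, added, avail) =>
    match pvWhileAdv counts bg fid added avail (counts.length + 1) with
    | none => none
    | some (fid, added, avail) =>
      match (if avail ≤ added then
               match PySem.List.pyGet? counts (fid + 1) with
               | none => none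
               | some c => pvWhileAdv counts bg (fid + 1) 0 (c + bg) (counts.length + 1)
             else some (fid, added, avail)) with
      | none => none
      | some (fid, added, avail) => some (d.insert idx fid, fid, added + 1, avail)

def sample_index_to_frame_id (num_cable_samples_per_frame : List Int) (num_bg_samples_per_frame : Int) : List (Int × Int) :=
  if num_cable_samples_per_frame.length = 0 then []
  else
    let num_total_samples := num_cable_samples_per_frame.sum + (num_cable_samples_per_frame.length : Int) * num_bg_samples_per_frame
    match PySem.List.pyGet? num_cable_samples_per_frame 0 with
    | none => []   -- unreachable: the list is nonempty
    | some c0 =>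
      match (PySem.List.pyRange 0 num_total_samples 1).foldl (pvStepA num_cable_samples_per_frame num_bg_samples_per_frame) (some (PySem.Dict.empty, 0, 0, c0 + num_bg_samples_per_frame)) with
      | none => []   -- 'none' = an IndexError; never reached under Pre_
      | some st => st.1.items

-- ===== PORT B =====
def sample_index_to_frame_id_alt (num_cable_samples_per_frame : List Int) (num_bg_samples_per_frame : Int) : List (Int × Int) :=
  let st := (PySem.List.enumerate num_cable_samples_per_frame 0).foldl
    (fun (st : PySem.Dict Int Int × Int) p =>
      (PySem.List.pyRange 0 (p.2 + num_bg_samples_per_frame) 1).foldl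
        (fun st2 _ => (st2.1.insert st2.2 p.1, st2.2 + 1)) st)
    (PySem.Dict.empty, 0)
  st.1.items

-- ===== PRECONDITION & SPEC =====
-- Pre_ excludes exactly the inputs that mix positive and negative per-frame
-- sample blocks (cable count + background count): sample counts are nonnegative
-- in the task's natural domain, and on those meaningless mixed inputs A's greedy
-- fill of sum-many indices and B's per-frame fill legitimately differ.
def Pre_sample_index_to_frame_id (num_cable_samples_per_frame : List Int) (num_bg_samples_per_frame : Int) : Prop :=
  (∀ c ∈ num_cable_samples_per_frame, 0 ≤ c + num_bg_samples_per_frame)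
  ∨ (∀ c ∈ num_cable_samples_per_frame, c + num_bg_samples_per_frame ≤ 0)
instance (num_cable_samples_per_frame : List Int) (num_bg_samples_per_frame : Int) : Decidable (Pre_sample_index_to_frame_id num_cable_samples_per_frame num_bg_samples_per_frame) := by unfold Pre_sample_index_to_frame_id; infer_instance

def pvWitness_sample_index_to_frame_id : List Int × Int := ([2, 0, 3], 1)

def Spec_sample_index_to_frame_id (num_cable_samples_per_frame : List Int) (num_bg_samples_per_frame : Int) (out : List (Int × Int)) : Prop := out = sample_index_to_frame_id_alt num_cable_samples_per_frame num_bg_samples_per_frame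
instance (num_cable_samples_per_frame : List Int) (num_bg_samples_per_frame : Int) (out : List (Int × Int)) : Decidable (Spec_sample_index_to_frame_id num_cable_samples_per_frame num_bg_samples_per_frame out) := by unfold Spec_sample_index_to_frame_id; infer_instance

-- ===== CLAIM (what is proved, stated in full; the proofs are below) =====
def Claim_equal_sample_index_to_frame_id : Prop := ∀ (num_cable_samples_per_frame : List Int) (num_bg_samples_per_frame : Int), Dom_sample_index_to_frame_id num_cable_samples_per_frame num_bg_samples_per_frame → Pre_sample_index_to_frame_id num_cable_samples_per_frame num_bg_samples_per_frame → Spec_sample_index_to_frame_id num_cable_samples_per_frame num_bg_samples_per_frame (sample_index_to_frame_id num_cable_samples_per_frame num_bg_samples_per_frame)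

-- ===== LEMMAS AND PROOFS =====


-- total block size of a list of frames
def pvS (bg : Int) (l : List Int) : Int := (l.map (· + bg)).sum

-- canonical result: frames l numbered from fid, indices from j
def pvSpec (bg : Int) : List Int → Int → Int → List (Int × Int)
  | [], _, _ => []
  | c :: rest, fid, j =>
    (PySem.List.pyRange j (j + (c + bg)) 1).map (fun k => (k, fid)) ++ pvSpec bg rest (fid + 1) (j + (c + bg))

theorem pvS_cons (bg c : Int) (l : List Int) : pvS bg (c :: l) = (c + bg) + pvS bg l := by
  simp [pvS]
theorem pvS_nonneg (bg : Int) (l : List Int) (h : ∀ c ∈ l, 0 ≤ c + bg) : 0 ≤ pvS bg l := by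
  induction l with
  | nil => simp [pvS]
  | cons c t ih =>
    rw [pvS_cons]
    have := h c (by simp)
    have := ih (fun c hc => h c (by simp [hc]))
    omega

theorem pvS_eq_total (bg : Int) (l : List Int) : pvS bg l = l.sum + (l.length : Int) * bg := by
  induction l with
  | nil => simp [pvS]
  | cons c t ih => rw [pvS_cons, ih]; simp; ring

theorem pvSpec_zeros (bg : Int) (zs : List Int) (hz : ∀ z ∈ zs, z + bg = 0) (fid j : Int) :
    pvSpec bg zs fid j = [] := by
  induction zs generalizing fid j with
  | nil => rfl
  | cons z t ih =>
    have h0 : z + bg = 0 := hz z (by simp)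
    simp only [pvSpec, h0]
    rw [PySem.List.pyRange_one_eq_nil (by omega)]
    simp [ih (fun z hz' => hz z (by simp [hz']))]

theorem pvSpec_zeros_append (bg : Int) (zs l : List Int) (hz : ∀ z ∈ zs, z + bg = 0) (fid j : Int) :
    pvSpec bg (zs ++ l) fid j = pvSpec bg l (fid + (zs.length : Int)) j := by
  induction zs generalizing fid with
  | nil => simp
  | cons z t ih =>
    have h0 : z + bg = 0 := hz z (by simp)
    simp only [List.cons_append, pvSpec, h0]
    rw [PySem.List.pyRange_one_eq_nil (by omega)]
    simp only [List.map_nil, List.nil_append, add_zero]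
    rw [ih (fun z hz' => hz z (by simp [hz']))]
    have : fid + 1 + (t.length : Int) = fid + ((t.length : Int) + 1) := by ring
    rw [this]
    simp

-- a nonneg list with positive block-sum splits at its first positive block
theorem pvFirstPos (bg : Int) (l : List Int) (hnn : ∀ c ∈ l, 0 ≤ c + bg) (hpos : 0 < pvS bg l) :
    ∃ zs c rest, l = zs ++ c :: rest ∧ (∀ z ∈ zs, z + bg = 0) ∧ 0 < c + bg := by
  induction l with
  | nil => simp [pvS] at hpos
  | cons c t ih =>
    by_cases hc : 0 < c + bg
    · exact ⟨[], c, t, by simp, by simp, hc⟩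
    · have hc0 : c + bg = 0 := by have := hnn c (by simp); omega
      have hpt : 0 < pvS bg t := by rw [pvS_cons] at hpos; omega
      obtain ⟨zs, c', rest, h1, h2, h3⟩ := ih (fun x hx => hnn x (by simp [hx])) hpt
      exact ⟨c :: zs, c', rest, by simp [h1], by
        intro z hz; rcases List.mem_cons.mp hz with h | h
        · rw [h]; exact hc0
        · exact h2 z h, h3⟩

-- pyGet? at a nonnegative index via List.drop
theorem pvGet_drop (counts : List Int) (i : Int) (hi : 0 ≤ i) :
    PySem.List.pyGet? counts i = (counts.drop i.toNat).head? := by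
  rw [PySem.List.pyGet?_of_nonneg counts hi, ← List.head?_drop]



theorem pvS_append (bg : Int) (xs ys : List Int) : pvS bg (xs ++ ys) = pvS bg xs + pvS bg ys := by
  simp [pvS]

theorem pvS_zeros (bg : Int) (zs : List Int) (hz : ∀ z ∈ zs, z + bg = 0) : pvS bg zs = 0 := by
  induction zs with
  | nil => rfl
  | cons z t ih =>
    rw [pvS_cons, hz z (by simp), ih (fun z hz' => hz z (by simp [hz']))]
    ring

theorem pvAllZero (bg : Int) (l : List Int) (hnn : ∀ c ∈ l, 0 ≤ c + bg) (hS : pvS bg l = 0) :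
    ∀ c ∈ l, c + bg = 0 := by
  induction l with
  | nil => simp
  | cons c t ih =>
    rw [pvS_cons] at hS
    have h1 : 0 ≤ c + bg := hnn c (by simp)
    have h2 : 0 ≤ pvS bg t := pvS_nonneg bg t (fun x hx => hnn x (by simp [hx]))
    intro x hx
    rcases List.mem_cons.mp hx with h | h
    · omega
    · exact ih (fun x hx => hnn x (by simp [hx])) (by omega) x h

theorem pvItemsEmpty : (PySem.Dict.empty : PySem.Dict Int Int).items = [] := rfl

theorem pvFresh (d : PySem.Dict Int Int) (j : Int) (hk : ∀ k ∈ d.keys, k < j) :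
    d.contains j = false := by
  by_contra h
  have h' : d.contains j = true := by simpa using h
  have := hk j ((PySem.Dict.contains_iff_mem_keys d j).mp h')
  omega

-- one-step unfoldings of the while loop
theorem pvWhileAdv_pos (counts : List Int) (bg fid added avail : Int) (fuel : Nat) (h : avail ≠ 0) :
    pvWhileAdv counts bg fid added avail (fuel + 1) = some (fid, added, avail) := by
  show (if avail = 0 then _ else _) = _
  rw [if_neg h]

theorem pvWhileAdv_zero (counts : List Int) (bg fid added c : Int) (fuel : Nat)
    (h : PySem.List.pyGet? counts (fid + 1) = some c) :
    pvWhileAdv counts bg fid added 0 (fuel + 1) = pvWhileAdv counts bg (fid + 1) 0 (c + bg) fuel := by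
  show (if (0 : Int) = 0 then _ else _) = _
  rw [if_pos rfl, h]

-- evaluation of one for-loop iteration given the value of the while loop(s)
theorem pvStepA_eval (counts : List Int) (bg : Int) (d : PySem.Dict Int Int)
    (fid a avail idx fid' ad' av' : Int)
    (hW : pvWhileAdv counts bg fid a avail (counts.length + 1) = some (fid', ad', av'))
    (hlt : ¬ av' ≤ ad') :
    pvStepA counts bg (some (d, fid, a, avail)) idx = some (d.insert idx fid', fid', ad' + 1, av') := by
  simp only [pvStepA]
  rw [hW]
  simp [hlt]

theorem pvStepA_eval2 (counts : List Int) (bg : Int) (d : PySem.Dict Int Int)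
    (fid a avail idx fid1 ad1 av1 c fid2 ad2 av2 : Int)
    (hW1 : pvWhileAdv counts bg fid a avail (counts.length + 1) = some (fid1, ad1, av1))
    (hge : av1 ≤ ad1)
    (hg : PySem.List.pyGet? counts (fid1 + 1) = some c)
    (hW2 : pvWhileAdv counts bg (fid1 + 1) 0 (c + bg) (counts.length + 1) = some (fid2, ad2, av2)) :
    pvStepA counts bg (some (d, fid, a, avail)) idx = some (d.insert idx fid2, fid2, ad2 + 1, av2) := by
  simp only [pvStepA]
  rw [hW1]
  simp [hge, hg, hW2]

-- the advance chain through the zero-block frames zs lands on the first positive block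
theorem pvWhileAdv_chain (counts : List Int) (bg : Int) (zs : List Int) (c : Int) (rest : List Int)
    (hz : ∀ z ∈ zs, z + bg = 0) (hc : c + bg ≠ 0) :
    ∀ (fid added : Int) (fuel : Nat), 0 ≤ fid →
      counts.drop (fid + 1).toNat = zs ++ c :: rest → zs.length + 2 ≤ fuel →
      pvWhileAdv counts bg fid added 0 fuel = some (fid + (zs.length : Int) + 1, 0, c + bg) := by
  induction zs with
  | nil =>
    intro fid added fuel hfid hdrop hfuel
    obtain ⟨f, rfl⟩ : ∃ f, fuel = (f + 1) + 1 := ⟨fuel - 2, by omega⟩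
    have hg : PySem.List.pyGet? counts (fid + 1) = some c := by
      rw [pvGet_drop counts (fid + 1) (by omega), hdrop]; rfl
    rw [pvWhileAdv_zero counts bg fid added c (f + 1) hg,
      pvWhileAdv_pos counts bg (fid + 1) 0 (c + bg) f hc]
    norm_num
  | cons z t ih =>
    intro fid added fuel hfid hdrop hfuel
    simp only [List.length_cons] at hfuel
    obtain ⟨f, rfl⟩ : ∃ f, fuel = f + 1 := ⟨fuel - 1, by omega⟩
    have hdropz : counts.drop (fid + 1).toNat = z :: (t ++ c :: rest) := by simpa using hdrop
    have hg : PySem.List.pyGet? counts (fid + 1) = some z := by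
      rw [pvGet_drop counts (fid + 1) (by omega), hdropz]; rfl
    have hz0 : z + bg = 0 := hz z (by simp)
    have hdrop' : counts.drop ((fid + 1) + 1).toNat = t ++ c :: rest := by
      have e1 : ((fid + 1) + 1).toNat = (fid + 1).toNat + 1 := by omega
      rw [e1, ← List.drop_drop, hdropz]
      simp
    rw [pvWhileAdv_zero counts bg fid added z f hg, hz0,
      ih (fun x hx => hz x (by simp [hx])) (fid + 1) 0 f (by omega) hdrop' (by omega)]
    have e2 : fid + 1 + (t.length : Int) + 1 = fid + ((t.length : Int) + 1) + 1 := by ring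
    rw [e2]
    norm_num

-- inner within-frame run of A: n plain insert steps, no advancing
theorem pvRunFrame (counts : List Int) (bg : Int) (fid b : Int) (hb : b ≠ 0) :
    ∀ (n : Nat) (a j : Int) (d : PySem.Dict Int Int), (a : Int) + n ≤ b →
      (∀ k ∈ d.keys, k < j) → d.keys.Nodup →
      ∃ d', (PySem.List.pyRange j (j + (n : Int)) 1).foldl (pvStepA counts bg) (some (d, fid, a, b))
              = some (d', fid, a + n, b)
        ∧ d'.items = d.items ++ (PySem.List.pyRange j (j + (n : Int)) 1).map (fun k => (k, fid))
        ∧ (∀ k ∈ d'.keys, k < j + n) ∧ d'.keys.Nodup := by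
  intro n
  induction n with
  | zero =>
    intro a j d _ hk hnd
    refine ⟨d, ?_, ?_, ?_, hnd⟩
    · rw [PySem.List.pyRange_one_eq_nil (by omega)]; simp
    · rw [PySem.List.pyRange_one_eq_nil (by omega)]; simp
    · simpa using hk
  | succ n ih =>
    intro a j d hab hk hnd
    have hab' : a + (n : Int) + 1 ≤ b := by push_cast at hab; omega
    have hcons : PySem.List.pyRange j (j + ((n : Nat) + 1 : Nat)) 1
        = j :: PySem.List.pyRange (j + 1) (j + ((n : Nat) + 1 : Nat)) 1 :=
      PySem.List.pyRange_one_cons (by push_cast; omega)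
    have hstep : pvStepA counts bg (some (d, fid, a, b)) j = some (d.insert j fid, fid, a + 1, b) :=
      pvStepA_eval counts bg d fid a b j fid a b
        (pvWhileAdv_pos counts bg fid a b counts.length hb) (by omega)
    have hkins : ∀ k ∈ (d.insert j fid).keys, k < j + 1 := by
      intro k hkk
      rcases (PySem.Dict.mem_keys_insert d j k fid).mp hkk with h | h
      · omega
      · have := hk k h; omega
    obtain ⟨d', h1, h2, h3, h4⟩ := ih (a + 1) (j + 1) (d.insert j fid) (by omega) hkins
      (PySem.Dict.nodup_keys_insert d j fid hnd)
    have e : j + 1 + (n : Int) = j + ((n : Nat) + 1 : Nat) := by push_cast; ring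
    rw [e] at h1 h2 h3
    refine ⟨d', ?_, ?_, ?_, h4⟩
    · rw [hcons]
      simp only [List.foldl_cons]
      rw [hstep, h1]
      congr 2
      push_cast; ring
    · rw [h2, PySem.Dict.items_insert_of_not_contains d fid (pvFresh d j hk), hcons]
      simp
    · intro k hkk
      have := h3 k hkk
      push_cast at this ⊢; omega

-- a boundary step of A (added ≥ avail, or avail = 0) advances to the first
-- positive-block frame and assigns the index to it
theorem pvStepA_boundary (counts : List Int) (bg : Int) (zs : List Int) (c : Int) (rest : List Int)
    (d : PySem.Dict Int Int) (fid a avail j : Int)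
    (hcond : avail = 0 ∨ avail ≤ a) (hfid : 0 ≤ fid)
    (hdrop : counts.drop (fid + 1).toNat = zs ++ c :: rest)
    (hz : ∀ z ∈ zs, z + bg = 0) (hc : 0 < c + bg) :
    pvStepA counts bg (some (d, fid, a, avail)) j
      = some (d.insert j (fid + (zs.length : Int) + 1), fid + (zs.length : Int) + 1, 1, c + bg) := by
  have hlen : zs.length + 2 ≤ counts.length + 1 := by
    have hl := congrArg List.length hdrop
    simp [List.length_drop] at hl
    omega
  by_cases h0 : avail = 0
  · subst h0
    have := pvStepA_eval counts bg d fid a 0 j (fid + (zs.length : Int) + 1) 0 (c + bg)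
      (pvWhileAdv_chain counts bg zs c rest hz (by omega) fid a (counts.length + 1) hfid hdrop hlen)
      (by omega)
    simpa using this
  · have ha : avail ≤ a := hcond.resolve_left h0
    have hW1 := pvWhileAdv_pos counts bg fid a avail counts.length h0
    cases zs with
    | nil =>
      have hg : PySem.List.pyGet? counts (fid + 1) = some c := by
        rw [pvGet_drop counts (fid + 1) (by omega)]
        simp only [List.nil_append] at hdrop
        rw [hdrop]; rfl
      have hW2 := pvWhileAdv_pos counts bg (fid + 1) 0 (c + bg) counts.length (by omega)
      have := pvStepA_eval2 counts bg d fid a avail j fid a avail c (fid + 1) 0 (c + bg) hW1 ha hg hW2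
      simpa using this
    | cons z t =>
      have hdropz : counts.drop (fid + 1).toNat = z :: (t ++ c :: rest) := by simpa using hdrop
      have hg : PySem.List.pyGet? counts (fid + 1) = some z := by
        rw [pvGet_drop counts (fid + 1) (by omega), hdropz]; rfl
      have hz0 : z + bg = 0 := hz z (by simp)
      have hdrop' : counts.drop ((fid + 1) + 1).toNat = t ++ c :: rest := by
        have e1 : ((fid + 1) + 1).toNat = (fid + 1).toNat + 1 := by omega
        rw [e1, ← List.drop_drop, hdropz]
        simp
      have hW2 : pvWhileAdv counts bg (fid + 1) 0 (z + bg) (counts.length + 1)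
          = some ((fid + 1) + (t.length : Int) + 1, 0, c + bg) := by
        rw [hz0]
        exact pvWhileAdv_chain counts bg t c rest (fun x hx => hz x (by simp [hx])) (by omega)
          (fid + 1) 0 (counts.length + 1) (by omega) hdrop'
          (by simp only [List.length_cons] at hlen; omega)
      have := pvStepA_eval2 counts bg d fid a avail j fid a avail z
        ((fid + 1) + (t.length : Int) + 1) 0 (c + bg) hW1 ha hg hW2
      have e2 : (fid + 1) + (t.length : Int) + 1 = fid + ((z :: t).length : Int) + 1 := by
        simp only [List.length_cons]; push_cast; ring
      rw [e2] at this
      simpa using this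

-- main run of A from an exhausted/empty frame: processes exactly the blocks of rest
theorem pvRunBoundary (counts : List Int) (bg : Int) :
    ∀ (N : Nat) (rest : List Int), rest.length ≤ N →
    ∀ (fid a avail j : Int) (d : PySem.Dict Int Int),
      (avail = 0 ∨ avail ≤ a) → 0 ≤ fid → counts.drop (fid + 1).toNat = rest →
      (∀ c ∈ rest, 0 ≤ c + bg) → (∀ k ∈ d.keys, k < j) → d.keys.Nodup →
      ∃ st, (PySem.List.pyRange j (j + pvS bg rest) 1).foldl (pvStepA counts bg) (some (d, fid, a, avail)) = some st
        ∧ st.1.items = d.items ++ pvSpec bg rest (fid + 1) j := by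
  intro N
  induction N with
  | zero =>
    intro rest hlen fid a avail j d hcond hfid hdrop hnn hk hnd
    have hnil : rest = [] := by cases rest with | nil => rfl | cons _ _ => simp at hlen
    subst hnil
    refine ⟨(d, fid, a, avail), ?_, by simp [pvSpec]⟩
    rw [show pvS bg [] = 0 from rfl, PySem.List.pyRange_one_eq_nil (by omega)]
    simp
  | succ N ih =>
    intro rest hlen fid a avail j d hcond hfid hdrop hnn hk hnd
    by_cases hS : pvS bg rest = 0
    · refine ⟨(d, fid, a, avail), ?_, ?_⟩
      · rw [hS, PySem.List.pyRange_one_eq_nil (by omega)]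
        simp
      · rw [pvSpec_zeros bg rest (pvAllZero bg rest hnn hS) (fid + 1) j]
        simp
    · have hSpos : 0 < pvS bg rest :=
        lt_of_le_of_ne (pvS_nonneg bg rest hnn) (Ne.symm hS)
      obtain ⟨zs, c, rest'', rfl, hz, hc⟩ := pvFirstPos bg rest hnn hSpos
      have hlen'' : rest''.length ≤ N := by
        simp only [List.length_append, List.length_cons] at hlen
        omega
      have hstep := pvStepA_boundary counts bg zs c rest'' d fid a avail j hcond hfid hdrop hz hc
      have hSdec : pvS bg (zs ++ c :: rest'') = (c + bg) + pvS bg rest'' := by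
        rw [pvS_append, pvS_zeros bg zs hz, pvS_cons]; ring
      have hS''nn : 0 ≤ pvS bg rest'' := pvS_nonneg bg rest'' (fun x hx => hnn x (by simp [hx]))
      have hcons : PySem.List.pyRange j (j + pvS bg (zs ++ c :: rest'')) 1
          = j :: PySem.List.pyRange (j + 1) (j + pvS bg (zs ++ c :: rest'')) 1 :=
        PySem.List.pyRange_one_cons (by omega)
      have hsplit : PySem.List.pyRange (j + 1) (j + pvS bg (zs ++ c :: rest'')) 1
          = PySem.List.pyRange (j + 1) (j + (c + bg)) 1
            ++ PySem.List.pyRange (j + (c + bg)) (j + pvS bg (zs ++ c :: rest'')) 1 :=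
        PySem.List.pyRange_one_append _ _ _ (by omega) (by rw [hSdec]; omega)
      have hkins : ∀ k ∈ (d.insert j (fid + (zs.length : Int) + 1)).keys, k < j + 1 := by
        intro k hkk
        rcases (PySem.Dict.mem_keys_insert d j k _).mp hkk with h | h
        · omega
        · have := hk k h; omega
      obtain ⟨d2, hrun1, hitems1, hk2, hnd2⟩ :=
        pvRunFrame counts bg (fid + (zs.length : Int) + 1) (c + bg) (by omega) (c + bg - 1).toNat
          1 (j + 1) (d.insert j (fid + (zs.length : Int) + 1))
          (by rw [Int.toNat_of_nonneg (by omega : (0:Int) ≤ c + bg - 1)]; omega)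
          hkins (PySem.Dict.nodup_keys_insert d j _ hnd)
      rw [Int.toNat_of_nonneg (by omega : (0:Int) ≤ c + bg - 1)] at hrun1 hitems1 hk2
      have e1 : j + 1 + (c + bg - 1) = j + (c + bg) := by ring
      have e2 : (1 : Int) + (c + bg - 1) = c + bg := by ring
      rw [e1, e2] at hrun1
      rw [e1] at hitems1 hk2
      have hdrop'' : counts.drop ((fid + (zs.length : Int) + 1) + 1).toNat = rest'' := by
        have e3 : ((fid + (zs.length : Int) + 1) + 1).toNat = (fid + 1).toNat + (zs.length + 1) := by
          omega
        rw [e3, ← List.drop_drop, hdrop,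
          show zs ++ c :: rest'' = (zs ++ [c]) ++ rest'' by simp,
          List.drop_left' (by simp)]
      obtain ⟨st, hrun2, hitems2⟩ := ih rest'' hlen'' (fid + (zs.length : Int) + 1) (c + bg) (c + bg)
        (j + (c + bg)) d2 (Or.inr le_rfl) (by omega) hdrop''
        (fun x hx => hnn x (by simp [hx])) hk2 hnd2
      refine ⟨st, ?_, ?_⟩
      · rw [hcons]
        simp only [List.foldl_cons]
        rw [hstep, hsplit, List.foldl_append, hrun1]
        have e4 : j + pvS bg (zs ++ c :: rest'') = (j + (c + bg)) + pvS bg rest'' := by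
          rw [hSdec]; ring
        rw [e4, hrun2]
      · rw [hitems2, hitems1,
          PySem.Dict.items_insert_of_not_contains d _ (pvFresh d j hk),
          pvSpec_zeros_append bg zs (c :: rest'') hz (fid + 1) j]
        simp only [pvSpec]
        have hr : PySem.List.pyRange j (j + (c + bg)) 1
            = j :: PySem.List.pyRange (j + 1) (j + (c + bg)) 1 :=
          PySem.List.pyRange_one_cons (by omega)
        rw [hr]
        have efid : fid + 1 + (zs.length : Int) = fid + (zs.length : Int) + 1 := by ring
        rw [efid]
        simp

-- B's inner loop: length-many fresh consecutive inserts
theorem pvRunInner {α : Type} (fid : Int) :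
    ∀ (l : List α) (j : Int) (d : PySem.Dict Int Int), (∀ k ∈ d.keys, k < j) → d.keys.Nodup →
      ∃ d', l.foldl (fun (st2 : PySem.Dict Int Int × Int) _ => (st2.1.insert st2.2 fid, st2.2 + 1)) (d, j)
              = (d', j + (l.length : Int))
        ∧ d'.items = d.items ++ (PySem.List.pyRange j (j + (l.length : Int)) 1).map (fun k => (k, fid))
        ∧ (∀ k ∈ d'.keys, k < j + (l.length : Int)) ∧ d'.keys.Nodup := by
  intro l
  induction l with
  | nil =>
    intro j d hk hnd
    refine ⟨d, by simp, ?_, by simpa using hk, hnd⟩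
    rw [PySem.List.pyRange_one_eq_nil (by simp)]
    simp
  | cons x t ih =>
    intro j d hk hnd
    have hkins : ∀ k ∈ (d.insert j fid).keys, k < j + 1 := by
      intro k hkk
      rcases (PySem.Dict.mem_keys_insert d j k fid).mp hkk with h | h
      · omega
      · have := hk k h; omega
    obtain ⟨d', h1, h2, h3, h4⟩ := ih (j + 1) (d.insert j fid) hkins
      (PySem.Dict.nodup_keys_insert d j fid hnd)
    have e : j + 1 + (t.length : Int) = j + ((x :: t).length : Int) := by
      simp only [List.length_cons]; push_cast; ring
    rw [e] at h1 h2 h3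
    refine ⟨d', ?_, ?_, h3, h4⟩
    · simpa using h1
    · rw [h2, PySem.Dict.items_insert_of_not_contains d fid (pvFresh d j hk)]
      have hr : PySem.List.pyRange j (j + ((x :: t).length : Int)) 1
          = j :: PySem.List.pyRange (j + 1) (j + ((x :: t).length : Int)) 1 :=
        PySem.List.pyRange_one_cons (by simp only [List.length_cons]; push_cast; omega)
      rw [hr]
      simp

-- B's outer loop over the enumerated frames
theorem pvB_outer (bg : Int) :
    ∀ (counts : List Int) (f0 j : Int) (d : PySem.Dict Int Int),
      (∀ c ∈ counts, 0 ≤ c + bg) → (∀ k ∈ d.keys, k < j) → d.keys.Nodup →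
      ∃ d', (PySem.List.enumerate counts f0).foldl
            (fun (st : PySem.Dict Int Int × Int) p =>
              (PySem.List.pyRange 0 (p.2 + bg) 1).foldl
                (fun st2 _ => (st2.1.insert st2.2 p.1, st2.2 + 1)) st) (d, j)
          = (d', j + pvS bg counts)
        ∧ d'.items = d.items ++ pvSpec bg counts f0 j
        ∧ (∀ k ∈ d'.keys, k < j + pvS bg counts) ∧ d'.keys.Nodup := by
  intro counts
  induction counts with
  | nil =>
    intro f0 j d _ hk hnd
    refine ⟨d, by simp [PySem.List.enumerate_nil, pvS], by simp [pvSpec], ?_, hnd⟩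
    intro k hkk
    have := hk k hkk
    rw [show pvS bg ([] : List Int) = 0 from rfl]
    omega
  | cons c t ih =>
    intro f0 j d hnn hk hnd
    have hb : 0 ≤ c + bg := hnn c (by simp)
    rw [PySem.List.enumerate_cons]
    simp only [List.foldl_cons]
    obtain ⟨d1, h1, h2, h3, h4⟩ := pvRunInner f0 (PySem.List.pyRange 0 (c + bg) 1) j d hk hnd
    have hlen : ((PySem.List.pyRange 0 (c + bg) 1).length : Int) = c + bg := by
      rw [PySem.List.length_pyRange_one]
      omega
    rw [hlen] at h1 h2 h3
    obtain ⟨d', g1, g2, g3, g4⟩ := ih (f0 + 1) (j + (c + bg)) d1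
      (fun x hx => hnn x (by simp [hx])) h3 h4
    refine ⟨d', ?_, ?_, ?_, g4⟩
    · rw [h1, g1, pvS_cons]
      congr 1
      ring
    · rw [g2, h2]
      simp only [pvSpec]
      simp
    · intro k hkk
      have := g3 k hkk
      rw [pvS_cons]
      omega

-- B equals the canonical result
theorem pvB_eq (counts : List Int) (bg : Int) (h : ∀ c ∈ counts, 0 ≤ c + bg) :
    sample_index_to_frame_id_alt counts bg = pvSpec bg counts 0 0 := by
  obtain ⟨d', h1, h2, _, _⟩ := pvB_outer bg counts 0 0 PySem.Dict.empty h
    (by simp [PySem.Dict.keys_empty]) PySem.Dict.nodup_keys_empty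
  show ((PySem.List.enumerate counts 0).foldl _ (PySem.Dict.empty, 0)).1.items = _
  rw [h1]
  simpa using h2

theorem pvS_nonpos (bg : Int) (l : List Int) (h : ∀ c ∈ l, c + bg ≤ 0) : pvS bg l ≤ 0 := by
  induction l with
  | nil => simp [pvS]
  | cons c t ih =>
    rw [pvS_cons]
    have := h c (by simp)
    have := ih (fun x hx => h x (by simp [hx]))
    omega

-- on all-nonpositive blocks A returns the empty dict
theorem pvA_nonpos (counts : List Int) (bg : Int) (h : ∀ c ∈ counts, c + bg ≤ 0) :
    sample_index_to_frame_id counts bg = [] := by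
  cases counts with
  | nil => rfl
  | cons c0 rest =>
    have hA : sample_index_to_frame_id (c0 :: rest) bg =
        match (PySem.List.pyRange 0 ((c0 :: rest).sum + ((c0 :: rest).length : Int) * bg) 1).foldl
            (pvStepA (c0 :: rest) bg) (some (PySem.Dict.empty, 0, 0, c0 + bg)) with
        | none => []
        | some st => st.1.items := by
      simp only [sample_index_to_frame_id]
      rw [if_neg (by simp : ¬(c0 :: rest).length = 0), PySem.List.pyGet?_zero_cons]
    have htot : (c0 :: rest).sum + ((c0 :: rest).length : Int) * bg = pvS bg (c0 :: rest) :=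
      (pvS_eq_total bg (c0 :: rest)).symm
    rw [hA, htot, PySem.List.pyRange_one_eq_nil (pvS_nonpos bg (c0 :: rest) h)]
    simp [pvItemsEmpty]

-- on all-nonpositive blocks B returns the empty dict
theorem pvB_nonpos (counts : List Int) (bg : Int) (h : ∀ c ∈ counts, c + bg ≤ 0) :
    sample_index_to_frame_id_alt counts bg = [] := by
  have key : ∀ (l : List Int) (f0 : Int) (st : PySem.Dict Int Int × Int),
      (∀ c ∈ l, c + bg ≤ 0) →
      (PySem.List.enumerate l f0).foldl
        (fun (st : PySem.Dict Int Int × Int) p =>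
          (PySem.List.pyRange 0 (p.2 + bg) 1).foldl
            (fun st2 _ => (st2.1.insert st2.2 p.1, st2.2 + 1)) st) st = st := by
    intro l
    induction l with
    | nil => intro f0 st _; simp [PySem.List.enumerate_nil]
    | cons c t ih =>
      intro f0 st hl
      rw [PySem.List.enumerate_cons]
      simp only [List.foldl_cons]
      rw [PySem.List.pyRange_one_eq_nil (by have := hl c (by simp); omega)]
      exact ih (f0 + 1) st (fun x hx => hl x (by simp [hx]))
  show ((PySem.List.enumerate counts 0).foldl _ (PySem.Dict.empty, 0)).1.items = _
  rw [key counts 0 (PySem.Dict.empty, 0) h]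
  exact pvItemsEmpty

-- A equals the canonical result
theorem pvA_eq (counts : List Int) (bg : Int) (h : ∀ c ∈ counts, 0 ≤ c + bg) :
    sample_index_to_frame_id counts bg = pvSpec bg counts 0 0 := by
  cases counts with
  | nil => rfl
  | cons c0 rest =>
    have hb0 : 0 ≤ c0 + bg := h c0 (by simp)
    have hnnr : ∀ x ∈ rest, 0 ≤ x + bg := fun x hx => h x (by simp [hx])
    have hdrop : (c0 :: rest).drop ((0 : Int) + 1).toNat = rest := by simp
    have htot : (c0 :: rest).sum + ((c0 :: rest).length : Int) * bg = (c0 + bg) + pvS bg rest := by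
      rw [← pvS_eq_total, pvS_cons]
    have hA : sample_index_to_frame_id (c0 :: rest) bg =
        match (PySem.List.pyRange 0 ((c0 :: rest).sum + ((c0 :: rest).length : Int) * bg) 1).foldl
            (pvStepA (c0 :: rest) bg) (some (PySem.Dict.empty, 0, 0, c0 + bg)) with
        | none => []
        | some st => st.1.items := by
      simp only [sample_index_to_frame_id]
      rw [if_neg (by simp : ¬(c0 :: rest).length = 0), PySem.List.pyGet?_zero_cons]
    rw [hA, htot]
    by_cases hb : c0 + bg = 0
    · rw [hb]
      obtain ⟨st, hrun, hitems⟩ := pvRunBoundary (c0 :: rest) bg rest.length rest le_rfl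
        0 0 0 0 PySem.Dict.empty (Or.inl rfl) le_rfl hdrop hnnr
        (by simp [PySem.Dict.keys_empty]) PySem.Dict.nodup_keys_empty
      rw [hrun]
      show st.1.items = _
      rw [hitems]
      simp only [pvSpec]
      rw [hb, PySem.List.pyRange_one_eq_nil (by omega)]
      simp [pvItemsEmpty]
    · have hbpos : 0 < c0 + bg := by omega
      have hS0 : 0 ≤ pvS bg rest := pvS_nonneg bg rest hnnr
      have hsplit : PySem.List.pyRange 0 ((c0 + bg) + pvS bg rest) 1
          = PySem.List.pyRange 0 (c0 + bg) 1
            ++ PySem.List.pyRange (c0 + bg) ((c0 + bg) + pvS bg rest) 1 :=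
        PySem.List.pyRange_one_append _ _ _ (by omega) (by omega)
      obtain ⟨d1, hrun1, hitems1, hk1, hnd1⟩ := pvRunFrame (c0 :: rest) bg 0 (c0 + bg) (by omega)
        (c0 + bg).toNat 0 0 PySem.Dict.empty
        (by rw [Int.toNat_of_nonneg hb0]; omega)
        (by simp [PySem.Dict.keys_empty]) PySem.Dict.nodup_keys_empty
      rw [Int.toNat_of_nonneg hb0] at hrun1 hitems1 hk1
      simp only [zero_add] at hrun1 hitems1 hk1
      obtain ⟨st, hrun2, hitems2⟩ := pvRunBoundary (c0 :: rest) bg rest.length rest le_rfl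
        0 (c0 + bg) (c0 + bg) (c0 + bg) d1 (Or.inr le_rfl) le_rfl hdrop hnnr hk1 hnd1
      rw [hsplit, List.foldl_append, hrun1, hrun2]
      show st.1.items = _
      rw [hitems2, hitems1]
      simp only [pvSpec]
      simp [pvItemsEmpty]

-- ===== VERDICT (by name: the statement is the Claim_ definition above) =====
theorem sample_index_to_frame_id_spec : Claim_equal_sample_index_to_frame_id := by
  intro counts bg _ hpre
  unfold Spec_sample_index_to_frame_id
  rcases hpre with hpre | hpre
  · rw [pvA_eq counts bg hpre, pvB_eq counts bg hpre]
  · rw [pvA_nonpos counts bg hpre, pvB_nonpos counts bg hpre]
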